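-- pv_equiv track=rewrite | github.com/pgorecki/aisd | kolokwia/2016_kolo1_rozw.py | sprzatanie
-- ===== SOURCE A (Python) =====
-- def sprzatanie(stosy):
--     wyniki = []
--     while True:
--         # szukam max i jego pozycje
--         max_v = 0
--         max_i = 0
--         for i in range(len(stosy)):
--             if stosy[i] > max_v:
--                 max_v = stosy[i]
--                 max_i = i
--
--         if max_v == 0:
--             break
--         stosy[max_i] = 0
--         wyniki.append(max_i)
--     return wyniki
-- ===== SOURCE B (Python) =====
-- def sprzatanie(stosy):
--     order = sorted((-v, i) for i, v in enumerate(stosy) if v > 0)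
--     for _, i in order:
--         stosy[i] = 0
--     return [i for _, i in order]
-- ===== Notes on version B (the rewrite author's own statement) =====
-- stated objective: alternative
-- what changed: Replaces the repeated full-scan find-max-then-zero selection loop with a single pass that collects (-value, index) pairs of the positive entries, sorts them once (lexicographic order reproduces A's largest-value-first, first-index-on-ties order), zeroes those entries, and reads the indices off the sorted list.
import Mathlib
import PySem

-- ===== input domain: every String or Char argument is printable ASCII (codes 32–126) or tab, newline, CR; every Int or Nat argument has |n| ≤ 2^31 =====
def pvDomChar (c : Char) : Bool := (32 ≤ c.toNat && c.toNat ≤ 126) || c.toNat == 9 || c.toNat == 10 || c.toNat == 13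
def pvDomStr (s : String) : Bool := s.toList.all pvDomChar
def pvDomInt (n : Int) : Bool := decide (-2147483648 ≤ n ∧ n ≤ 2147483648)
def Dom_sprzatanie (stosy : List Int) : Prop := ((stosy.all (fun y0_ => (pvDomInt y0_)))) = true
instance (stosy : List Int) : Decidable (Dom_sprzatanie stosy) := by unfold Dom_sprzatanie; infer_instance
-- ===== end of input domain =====

-- B replaces A's repeated find-max-and-zero scans by one sort of (-value, index) pairs;
-- both mutate the argument identically in Python (all positive entries zeroed),
-- and the theorems below are about the RETURN value.

-- ===== PORT A =====
-- the inner 'for i in range(len(stosy))' max-search of A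
def sprzFind (stosy : List Int) : Int × Int :=
  (PySem.List.pyRange 0 (PySem.List.len stosy) 1).foldl
    (fun s i => if PySem.List.pyGetD stosy i 0 > s.1 then (PySem.List.pyGetD stosy i 0, i) else s)
    (0, 0)

-- A's 'while True' loop; the fuel only makes it total: each iteration zeroes one positive
-- entry, so length+1 rounds always reach the 'max_v == 0' break.
def sprzAux : Nat → List Int → List Int → List Int
  | 0, _, wyniki => wyniki
  | fuel + 1, stosy, wyniki =>
    let r := sprzFind stosy
    if r.1 = 0 then wyniki
    else sprzAux fuel (PySem.List.pySetD stosy r.2 0) (wyniki ++ [r.2])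

def sprzatanie (stosy : List Int) : List Int := sprzAux (stosy.length + 1) stosy []

-- ===== PORT B =====
def sprzatanie_alt (stosy : List Int) : List Int :=
  let order := PySem.List.sorted2
    (((PySem.List.enumerate stosy 0).filter (fun p => decide (p.2 > 0))).map (fun p => (-p.2, p.1)))
    Prod.fst Prod.snd false
  -- 'for _, i in order: stosy[i] = 0' — mutates only the local list, return value unaffected
  let _stosy := order.foldl (fun s p => PySem.List.pySetD s p.2 0) stosy
  order.map (fun p => p.2)

-- ===== PRECONDITION & SPEC =====
def Spec_sprzatanie (stosy : List Int) (out : List Int) : Prop := out = sprzatanie_alt stosy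
instance (stosy : List Int) (out : List Int) : Decidable (Spec_sprzatanie stosy out) := by unfold Spec_sprzatanie; infer_instance

-- ===== CLAIM (what is proved, stated in full; the proofs are below) =====
def Claim_equal_sprzatanie : Prop := ∀ (stosy : List Int), Dom_sprzatanie stosy → Spec_sprzatanie stosy (sprzatanie stosy)

-- ===== LEMMAS AND PROOFS =====

-- lexicographic ≤ on the (-value, index) pairs (Python's tuple order)
def lexle (a b : Int × Int) : Prop := a.1 < b.1 ∨ (a.1 = b.1 ∧ a.2 ≤ b.2)

-- the comparator sorted2 … Prod.fst Prod.snd uses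
def bef (a b : Int × Int) : Bool :=
  decide (a.1 < b.1) || (!decide (b.1 < a.1) && decide (a.2 < b.2))

lemma lexle_trans {a b c : Int × Int} (h1 : lexle a b) (h2 : lexle b c) : lexle a c := by
  unfold lexle at *; omega

lemma insertBy_pairwise (x : Int × Int) (acc : List (Int × Int))
    (h : acc.Pairwise lexle) : (PySem.List.insertBy bef x acc).Pairwise lexle := by
  induction acc with
  | nil => simp [PySem.List.insertBy]
  | cons y ys ih =>
    rw [List.pairwise_cons] at h
    by_cases hb : bef x y = true
    · have hxy : lexle x y := by
        simp [bef] at hb; unfold lexle; omega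
      simp only [PySem.List.insertBy, hb, if_true]
      refine List.pairwise_cons.2 ⟨?_, List.pairwise_cons.2 ⟨h.1, h.2⟩⟩
      intro z hz
      rcases List.mem_cons.1 hz with rfl | hz'
      · exact hxy
      · exact lexle_trans hxy (h.1 z hz')
    · have hyx : lexle y x := by
        simp [bef] at hb; unfold lexle; omega
      simp only [PySem.List.insertBy, hb]
      refine List.pairwise_cons.2 ⟨?_, ih h.2⟩
      intro z hz
      rcases (PySem.List.mem_insertBy bef x z ys).1 hz with rfl | hz'
      · exact hyx
      · exact h.1 z hz'

lemma foldl_insertBy_pairwise (xs : List (Int × Int)) :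
    ∀ acc : List (Int × Int), acc.Pairwise lexle →
      (xs.foldl (fun acc x => PySem.List.insertBy bef x acc) acc).Pairwise lexle := by
  induction xs with
  | nil => intro acc h; simpa using h
  | cons x xs ih =>
    intro acc h
    simpa using ih _ (insertBy_pairwise x acc h)

lemma sorted2_eq_foldl (xs : List (Int × Int)) :
    PySem.List.sorted2 xs Prod.fst Prod.snd false
      = xs.foldl (fun acc x => PySem.List.insertBy bef x acc) [] := rfl

lemma sorted2_pairwise_lexle (xs : List (Int × Int)) :
    (PySem.List.sorted2 xs Prod.fst Prod.snd false).Pairwise lexle := by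
  rw [sorted2_eq_foldl]
  exact foldl_insertBy_pairwise xs [] (List.Pairwise.nil)

lemma sorted2_unique (xs ys : List (Int × Int))
    (hp : ys.Perm xs) (hs : ys.Pairwise lexle) :
    PySem.List.sorted2 xs Prod.fst Prod.snd false = ys := by
  refine List.Perm.eq_of_pairwise ?_ (sorted2_pairwise_lexle xs) hs
    (((PySem.List.sorted2_perm xs Prod.fst Prod.snd false)).trans hp.symm)
  intro a b _ _ h1 h2
  unfold lexle at h1 h2
  have : a.1 = b.1 ∧ a.2 = b.2 := by omega
  exact Prod.ext this.1 this.2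

-- the body of A's max-search, as a function of (state, enumerated element)
def fmStep (s : Int × Int) (p : Int × Int) : Int × Int :=
  if p.2 > s.1 then (p.2, p.1) else s

lemma sprzFind_eq (stosy : List Int) :
    sprzFind stosy = (PySem.List.enumerate stosy 0).foldl fmStep (0, 0) := by
  rw [PySem.List.enumerate_eq_map_pyRange stosy 0, List.foldl_map]
  rfl

-- what the max-search loop computes: either nothing beat the start value, or the result is
-- the first occurrence of the maximum
lemma fm (xs : List Int) : ∀ (s0 v0 i0 : Int) (r : Int × Int),
    (PySem.List.enumerate xs s0).foldl fmStep (v0, i0) = r →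
    (r = (v0, i0) ∧ ∀ x ∈ xs, x ≤ v0) ∨
    (v0 < r.1 ∧ ∃ t1 t2, xs = t1 ++ r.1 :: t2 ∧ r.2 = s0 + t1.length ∧
      (∀ y ∈ t1, y < r.1) ∧ (∀ y ∈ t2, y ≤ r.1)) := by
  induction xs with
  | nil => intro s0 v0 i0 r h; left; simp [PySem.List.enumerate] at h; simp [← h]
  | cons x xs ih =>
    intro s0 v0 i0 r h
    rw [PySem.List.enumerate_cons, List.foldl_cons] at h
    by_cases hx : x > v0
    · simp only [fmStep, hx, if_pos] at h
      rcases ih (s0 + 1) x s0 r h with ⟨hr, hall⟩ | ⟨hv, t1, t2, hxs, hi, h1, h2⟩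
      · right
        refine ⟨by rw [hr]; exact hx, [], xs, ?_, ?_, by simp, ?_⟩
        · simp [hr]
        · simp [hr]
        · intro y hy; rw [hr]; exact hall y hy
      · right
        refine ⟨lt_trans hx hv, x :: t1, t2, by simp [hxs], ?_, ?_, h2⟩
        · simp only [List.length_cons]; push_cast; omega
        · intro y hy
          rcases List.mem_cons.1 hy with rfl | hy'
          · exact hv
          · exact h1 y hy'
    · rw [show fmStep (v0, i0) (s0, x) = (v0, i0) from by simp [fmStep, hx]] at h
      rw [not_lt] at hx
      rcases ih (s0 + 1) v0 i0 r h with ⟨hr, hall⟩ | ⟨hv, t1, t2, hxs, hi, h1, h2⟩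
      · left
        refine ⟨hr, ?_⟩
        intro y hy
        rcases List.mem_cons.1 hy with rfl | hy'
        · exact hx
        · exact hall y hy'
      · right
        refine ⟨hv, x :: t1, t2, by simp [hxs], ?_, ?_, h2⟩
        · simp only [List.length_cons]; push_cast; omega
        · intro y hy
          rcases List.mem_cons.1 hy with rfl | hy'
          · omega
          · exact h1 y hy'

-- the (-value, index) pairs of the positive entries, enumeration starting at s
def pairsFrom (xs : List Int) (s : Int) : List (Int × Int) :=
  ((PySem.List.enumerate xs s).filter (fun p => decide (p.2 > 0))).map (fun p => (-p.2, p.1))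

lemma pairsFrom_append (xs ys : List Int) (s : Int) :
    pairsFrom (xs ++ ys) s = pairsFrom xs s ++ pairsFrom ys (s + xs.length) := by
  simp [pairsFrom, PySem.List.enumerate_append, List.filter_append]

lemma pairsFrom_cons_pos (x : Int) (xs : List Int) (s : Int) (hx : 0 < x) :
    pairsFrom (x :: xs) s = (-x, s) :: pairsFrom xs (s + 1) := by
  simp [pairsFrom, PySem.List.enumerate_cons, hx]

lemma pairsFrom_cons_nonpos (x : Int) (xs : List Int) (s : Int) (hx : ¬ 0 < x) :
    pairsFrom (x :: xs) s = pairsFrom xs (s + 1) := by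
  simp [pairsFrom, PySem.List.enumerate_cons, hx]

lemma mem_pairsFrom {xs : List Int} {s : Int} {q : Int × Int} (h : q ∈ pairsFrom xs s) :
    ∃ (k : Nat) (hk : k < xs.length), q = (-xs[k], s + k) ∧ 0 < xs[k] := by
  simp only [pairsFrom, List.mem_map, List.mem_filter] at h
  obtain ⟨p, ⟨hpe, hpf⟩, hq⟩ := h
  obtain ⟨k, hk, rfl⟩ := (PySem.List.mem_enumerate_iff xs s p).1 hpe
  exact ⟨k, hk, by simp [← hq], by simpa using hpf⟩

lemma pairsFrom_nil_of_nonpos {xs : List Int} (s : Int) (h : ∀ x ∈ xs, ¬ 0 < x) :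
    pairsFrom xs s = [] := by
  simp only [pairsFrom, List.map_eq_nil_iff, List.filter_eq_nil_iff]
  intro p hp
  obtain ⟨k, hk, rfl⟩ := (PySem.List.mem_enumerate_iff xs s p).1 hp
  simpa using h _ (xs.getElem_mem hk)

lemma set_append_cons (t1 t2 : List Int) (m v : Int) :
    (t1 ++ m :: t2).set t1.length v = t1 ++ v :: t2 := by
  induction t1 with
  | nil => rfl
  | cons a t1 ih => simp [List.set_cons_succ, ih]

-- the heart of the equivalence: sorting the pairs of t1 ++ m :: t2 (m the first maximum)
-- puts (-m, |t1|) first, then the sorted pairs of t1 ++ 0 :: t2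
lemma sorted_pairs_step (t1 t2 : List Int) (m : Int) (hm : 0 < m)
    (h1 : ∀ y ∈ t1, y < m) (h2 : ∀ y ∈ t2, y ≤ m) :
    PySem.List.sorted2 (pairsFrom (t1 ++ m :: t2) 0) Prod.fst Prod.snd false
      = (-m, (t1.length : Int)) ::
        PySem.List.sorted2 (pairsFrom (t1 ++ 0 :: t2) 0) Prod.fst Prod.snd false := by
  have e1 : pairsFrom (t1 ++ m :: t2) 0
      = pairsFrom t1 0 ++ (-m, (t1.length : Int)) :: pairsFrom t2 ((t1.length : Int) + 1) := by
    rw [pairsFrom_append, pairsFrom_cons_pos m t2 _ hm]; ring_nf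
  have e2 : pairsFrom (t1 ++ 0 :: t2) 0
      = pairsFrom t1 0 ++ pairsFrom t2 ((t1.length : Int) + 1) := by
    rw [pairsFrom_append, pairsFrom_cons_nonpos 0 t2 _ (by omega)]; ring_nf
  apply sorted2_unique
  · have hp0 : (PySem.List.sorted2 (pairsFrom (t1 ++ 0 :: t2) 0) Prod.fst Prod.snd false).Perm
        (pairsFrom t1 0 ++ pairsFrom t2 ((t1.length : Int) + 1)) := by
      rw [e2]
      exact PySem.List.sorted2_perm _ _ _ _
    rw [e1]
    exact (hp0.cons ((-m, (t1.length : Int)))).trans List.perm_middle.symm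
  · refine List.pairwise_cons.2 ⟨?_, sorted2_pairwise_lexle _⟩
    intro q hq
    have hq' : q ∈ pairsFrom t1 0 ++ pairsFrom t2 ((t1.length : Int) + 1) := by
      rw [e2] at hq
      exact ((PySem.List.sorted2_perm _ _ _ _).mem_iff).1 hq
    rcases List.mem_append.1 hq' with hq1 | hq2
    · obtain ⟨k, hk, rfl, hpos⟩ := mem_pairsFrom hq1
      have := h1 _ (t1.getElem_mem hk)
      unfold lexle; left; simp; omega
    · obtain ⟨k, hk, rfl, hpos⟩ := mem_pairsFrom hq2
      have := h2 _ (t2.getElem_mem hk)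
      unfold lexle; simp; omega

lemma main_aux : ∀ (n : Nat) (stosy acc : List Int) (fuel : Nat),
    stosy.countP (fun v => decide (0 < v)) = n → n < fuel →
    sprzAux fuel stosy acc
      = acc ++ (PySem.List.sorted2 (pairsFrom stosy 0) Prod.fst Prod.snd false).map Prod.snd := by
  intro n
  induction n with
  | zero =>
    intro stosy acc fuel hc hf
    obtain ⟨f, rfl⟩ : ∃ f, fuel = f + 1 := ⟨fuel - 1, by omega⟩
    have hnp : ∀ x ∈ stosy, ¬ 0 < x := by
      intro x hx
      simpa using List.countP_eq_zero.1 hc x hx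
    have hr : sprzFind stosy = (0, 0) := by
      rcases fm stosy 0 0 0 (sprzFind stosy) (sprzFind_eq stosy).symm with ⟨hr, _⟩ | ⟨hv, t1, t2, hxs, _, _, _⟩
      · exact hr
      · exfalso
        have hmem : (sprzFind stosy).1 ∈ t1 ++ (sprzFind stosy).1 :: t2 := by simp
        rw [← hxs] at hmem
        exact hnp _ hmem hv
    simp [sprzAux, hr, pairsFrom_nil_of_nonpos 0 hnp, PySem.List.sorted2]
  | succ n ih =>
    intro stosy acc fuel hc hf
    obtain ⟨f, rfl⟩ : ∃ f, fuel = f + 1 := ⟨fuel - 1, by omega⟩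
    rcases fm stosy 0 0 0 (sprzFind stosy) (sprzFind_eq stosy).symm with ⟨hr, hall⟩ | ⟨hv, t1, t2, hxs, hi, h1, h2⟩
    · exfalso
      have : stosy.countP (fun v => decide (0 < v)) = 0 := by
        rw [List.countP_eq_zero]
        intro x hx
        simpa using not_lt.2 (hall x hx)
      omega
    · set r := sprzFind stosy with hrdef
      have hm : 0 < r.1 := hv
      have hset : PySem.List.pySetD stosy r.2 0 = t1 ++ 0 :: t2 := by
        have : r.2 = ((t1.length : Nat) : Int) := by rw [hi]; ring
        rw [this, PySem.List.pySetD_natCast, hxs, set_append_cons]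
      have hcount : (t1 ++ 0 :: t2).countP (fun v => decide (0 < v)) = n := by
        rw [hxs] at hc
        simp only [List.countP_append, List.countP_cons, decide_eq_true_eq] at hc ⊢
        split_ifs at hc ⊢ <;> omega
      have step : sprzAux (f + 1) stosy acc
          = sprzAux f (t1 ++ 0 :: t2) (acc ++ [r.2]) := by
        rw [show sprzAux (f + 1) stosy acc
            = (if (sprzFind stosy).1 = 0 then acc
               else sprzAux f (PySem.List.pySetD stosy (sprzFind stosy).2 0) (acc ++ [(sprzFind stosy).2])) from rfl]
        rw [← hrdef, if_neg (by omega), hset]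
      rw [step, ih _ _ f hcount (by omega), hxs,
        sorted_pairs_step t1 t2 r.1 hm h1 h2]
      have : r.2 = (t1.length : Int) := by rw [hi]; ring
      simp [this]

-- ===== VERDICT (by name: the statement is the Claim_ definition above) =====
theorem sprzatanie_spec : Claim_equal_sprzatanie := by
  intro stosy _
  unfold Spec_sprzatanie sprzatanie sprzatanie_alt
  have hle : stosy.countP (fun v => decide (0 < v)) ≤ stosy.length := List.countP_le_length
  rw [main_aux (stosy.countP (fun v => decide (0 < v))) stosy [] (stosy.length + 1) rfl (by omega)]
  rfl
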